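-- pv_equiv track=rewrite | github.com/luizrennocosta/comp1ufrj | listas/lista1/submissions/123677819_lista1.py | questao1
-- ===== SOURCE A (Python) =====
-- def questao1(N,ar):
--     #estabelecendo uma variável para a contagem de pares
--     pares = 0
--     #a função irá analisar cor por cor, e para manter o registro das já analisadas, estabeleceremos uma lista
--     cor_analisada=[]
--     for cor in ar:
--         if cor in cor_analisada:
--             #se estiver na lista de cores analisdas, é retirada e um par é contado
--             pares += 1
--             cor_analisada.remove(cor)
--         else:
--             cor_analisada.append(cor)
--     return pares
-- ===== SOURCE B (Python) =====
-- def questao1(N, ar):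
--     counts = {}
--     for cor in ar:
--         counts[cor] = counts.get(cor, 0) + 1
--     return sum(v // 2 for v in counts.values())
-- ===== Notes on version B (the rewrite author's own statement) =====
-- stated objective: simpler
-- what changed: Replaces A's online toggle list (membership test + remove per element) with a two-pass build-frequency-dict-then-sum-of-halves decomposition; floor(count/2) equals the number of pairs A toggles off.
import Mathlib
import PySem

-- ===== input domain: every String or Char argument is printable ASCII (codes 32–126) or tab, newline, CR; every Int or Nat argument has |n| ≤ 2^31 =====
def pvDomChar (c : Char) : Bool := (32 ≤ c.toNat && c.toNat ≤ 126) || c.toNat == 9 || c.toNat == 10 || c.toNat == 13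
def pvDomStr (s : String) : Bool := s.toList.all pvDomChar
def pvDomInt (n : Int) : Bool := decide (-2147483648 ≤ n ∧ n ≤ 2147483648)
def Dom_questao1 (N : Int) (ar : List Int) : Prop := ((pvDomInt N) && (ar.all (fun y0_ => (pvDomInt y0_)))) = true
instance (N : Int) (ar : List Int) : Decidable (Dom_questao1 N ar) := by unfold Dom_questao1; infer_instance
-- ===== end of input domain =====

-- B replaces A's online toggle list with a frequency dictionary summed by halves (a two-pass decomposition without the inner list scan).
-- ===== PORT A =====
-- step of A's loop: membership test in the analysed list, then remove (present, so remove? is some) or append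
def questao1Step (st : Int × List Int) (cor : Int) : Int × List Int :=
  if cor ∈ st.2 then (st.1 + 1, (PySem.List.remove? st.2 cor).getD st.2)
  else (st.1, st.2 ++ [cor])

def questao1 (N : Int) (ar : List Int) : Int :=
  (ar.foldl questao1Step ((0 : Int), ([] : List Int))).1

-- ===== PORT B =====
def questao1_alt (N : Int) (ar : List Int) : Int :=
  ((ar.foldl (fun d cor => d.insert cor (d.getD cor 0 + 1))
      (PySem.Dict.empty : PySem.Dict Int Int)).values).foldl
    (fun s v => s + PySem.Int.floordiv v 2) 0

-- ===== PRECONDITION & SPEC =====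
def Spec_questao1 (N : Int) (ar : List Int) (out : Int) : Prop := out = questao1_alt N ar
instance (N : Int) (ar : List Int) (out : Int) : Decidable (Spec_questao1 N ar out) := by unfold Spec_questao1; infer_instance

-- ===== CLAIM (what is proved, stated in full; the proofs are below) =====
def Claim_equal_questao1 : Prop := ∀ (N : Int) (ar : List Int), Dom_questao1 N ar → Spec_questao1 N ar (questao1 N ar)

-- ===== LEMMAS AND PROOFS =====

-- the invariant value of A's loop: pairs completable from carry-over l plus the rest xs
def pvPairs (l xs : List Int) : Nat :=
  ∑ k ∈ (l ++ xs).toFinset, (l.count k + xs.count k) / 2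

lemma pvPairs_nil (l : List Int) (hl : l.Nodup) : pvPairs l [] = 0 := by
  unfold pvPairs
  refine Finset.sum_eq_zero ?_
  intro k hk
  have h1 : l.count k ≤ 1 := List.nodup_iff_count_le_one.1 hl k
  simp only [List.count_nil]
  omega

lemma questao1_loop_inv (xs : List Int) : ∀ (p : Int) (l : List Int), l.Nodup →
    (xs.foldl questao1Step (p, l)).1 = p + (pvPairs l xs : Int) := by
  induction xs with
  | nil => intro p l hl; simp [pvPairs_nil l hl]
  | cons x rest ih =>
    intro p l hl
    simp only [List.foldl_cons]
    by_cases hx : x ∈ l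
    · have hrem : questao1Step (p, l) x = (p + 1, l.erase x) := by
        simp [questao1Step, hx, PySem.List.remove?_eq_some_erase l x hx]
      rw [hrem, ih (p + 1) (l.erase x) (hl.erase x)]
      have hnat : pvPairs (l.erase x) rest + 1 = pvPairs l (x :: rest) := by
        unfold pvPairs
        -- index sets: (l.erase x ++ rest).toFinset ⊆ (l ++ x :: rest).toFinset, missing terms are 0
        have hsub : (l.erase x ++ rest).toFinset ⊆ (l ++ x :: rest).toFinset := by
          intro k hk
          simp only [List.mem_toFinset, List.mem_append, List.mem_cons] at hk ⊢
          rcases hk with h | h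
          · exact Or.inl (List.mem_of_mem_erase h)
          · exact Or.inr (Or.inr h)
        have hext : ∑ k ∈ (l.erase x ++ rest).toFinset, ((l.erase x).count k + rest.count k) / 2
            = ∑ k ∈ (l ++ x :: rest).toFinset, ((l.erase x).count k + rest.count k) / 2 := by
          refine Finset.sum_subset hsub ?_
          intro k _ hk
          simp only [List.mem_toFinset, List.mem_append] at hk
          have h1 : (l.erase x).count k = 0 :=
            List.count_eq_zero.2 (fun hm => hk (Or.inl hm))
          have h2 : rest.count k = 0 :=
            List.count_eq_zero.2 (fun hm => hk (Or.inr hm))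
          simp [h1, h2]
        rw [hext]
        have hxmem : x ∈ (l ++ x :: rest).toFinset := by simp
        rw [← Finset.add_sum_erase _ _ hxmem, ← Finset.add_sum_erase _ _ hxmem]
        have hterms : ∑ k ∈ ((l ++ x :: rest).toFinset).erase x, ((l.erase x).count k + rest.count k) / 2
            = ∑ k ∈ ((l ++ x :: rest).toFinset).erase x, (l.count k + (x :: rest).count k) / 2 := by
          refine Finset.sum_congr rfl ?_
          intro k hk
          have hne : k ≠ x := (Finset.mem_erase.1 hk).1
          have hne' : x ≠ k := fun h => hne h.symm
          simp [List.count_erase_of_ne hne, List.count_cons, beq_iff_eq, hne']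
        rw [hterms]
        have hcx : l.count x = 1 := List.count_eq_one_of_mem hl hx
        have hex : (l.erase x).count x = 0 := by
          rw [List.count_erase_self, hcx]
        rw [hex, hcx, List.count_cons_self]
        omega
      have hkey : (pvPairs (l.erase x) rest : Int) + 1 = (pvPairs l (x :: rest) : Int) := by
        exact_mod_cast hnat
      omega
    · have hap : questao1Step (p, l) x = (p, l ++ [x]) := by
        simp [questao1Step, hx]
      have hnd : (l ++ [x]).Nodup := by
        simp only [List.nodup_append, List.nodup_singleton]
        refine ⟨hl, trivial, ?_⟩
        intro a ha b hb
        simp only [List.mem_singleton] at hb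
        subst hb
        exact fun h => hx (h ▸ ha)
      rw [hap, ih p (l ++ [x]) hnd]
      have heq : pvPairs (l ++ [x]) rest = pvPairs l (x :: rest) := by
        unfold pvPairs
        have hset : ((l ++ [x]) ++ rest).toFinset = (l ++ x :: rest).toFinset := by
          ext k
          simp only [List.mem_toFinset, List.mem_append, List.mem_cons, List.mem_singleton]
          tauto
        rw [hset]
        refine Finset.sum_congr rfl ?_
        intro k _
        congr 1
        simp only [List.count_append, List.count_cons, List.count_nil]
        split_ifs <;> omega
      rw [heq]

lemma pvFoldl_add_sum (g : Int → Int) : ∀ (l : List Int) (s : Int),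
    l.foldl (fun a v => a + g v) s = s + (l.map g).sum := by
  intro l
  induction l with
  | nil => simp
  | cons x xs ih => intro s; simp [ih, add_assoc]

lemma questao1_alt_eq (N : Int) (ar : List Int) :
    questao1_alt N ar = ((PySem.List.dedup ar).map (fun k => ((ar.count k / 2 : Nat) : Int))).sum := by
  unfold questao1_alt
  rw [PySem.Dict.foldl_insert_getD_add_one_eq_counter]
  have hvals : (PySem.Dict.counter ar).values
      = (PySem.List.dedup ar).map (fun k => ((ar.count k : Nat) : Int)) := by
    show (PySem.Dict.counter ar).items.map (·.2) = _
    rw [PySem.Dict.items_counter, ← PySem.List.dedup_eq_ofList, List.map_map]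
    rfl
  rw [hvals, pvFoldl_add_sum, zero_add, List.map_map]
  congr 1
  refine List.map_congr_left ?_
  intro k _
  show PySem.Int.floordiv ((ar.count k : Nat) : Int) 2 = ((ar.count k / 2 : Nat) : Int)
  exact_mod_cast PySem.Int.floordiv_natCast (ar.count k) 2

lemma pvPairs_nil_left (ar : List Int) :
    pvPairs [] ar = ((PySem.List.dedup ar).map (fun k => ar.count k / 2)).sum := by
  unfold pvPairs
  rw [← List.sum_toFinset _ (PySem.List.nodup_dedup ar)]
  refine Finset.sum_congr ?_ ?_
  · ext k; simp [PySem.List.mem_dedup]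
  · intro k _; simp

-- ===== VERDICT (by name: the statement is the Claim_ definition above) =====
theorem questao1_spec : Claim_equal_questao1 := by
  intro N ar _
  unfold Spec_questao1 questao1
  rw [questao1_loop_inv ar 0 [] List.nodup_nil, questao1_alt_eq, pvPairs_nil_left,
    Nat.cast_list_sum, List.map_map]
  rw [zero_add]
  exact congrArg List.sum (List.map_congr_left fun k _ => rfl)
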